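-- pv_equiv track=rewrite | github.com/Ben-musampa/Playfair | Playfair.py | separer_lettres_semblables
-- ===== SOURCE A (Python) =====
-- speciale = "X" #le carractère speciale
--
-- def separer_lettres_semblables(message):
--     index = 0
--     while (index<len(message)):
--         m1 = message[index]
--         if index == len(message)-1:
--             message = message + speciale
--             index += 2
--             continue
--         m2 = message[index+1]
--         if m1==m2:
--             message = message[:index+1] + speciale + message[index+1:]
--         index +=2
--     return message
-- ===== SOURCE B (Python) =====
-- def separer_lettres_semblables(message):
--     out = []
--     pending = None
--     for c in message:
--         if pending is None:
--             pending = c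
--         elif pending == c:
--             out.append(pending)
--             out.append('X')
--             pending = c
--         else:
--             out.append(pending)
--             out.append(c)
--             pending = None
--     if pending is not None:
--         out.append(pending)
--         out.append('X')
--     return ''.join(out)
-- ===== Notes on version B (the rewrite author's own statement) =====
-- stated objective: simpler
-- what changed: A scans with a step-by-2 index while repeatedly appending to / re-slicing and reassigning the whole string on each insertion; B is a single streaming pass with a pending-character state machine that appends to an output list and joins once, never rebuilding the input.
import Mathlib
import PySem

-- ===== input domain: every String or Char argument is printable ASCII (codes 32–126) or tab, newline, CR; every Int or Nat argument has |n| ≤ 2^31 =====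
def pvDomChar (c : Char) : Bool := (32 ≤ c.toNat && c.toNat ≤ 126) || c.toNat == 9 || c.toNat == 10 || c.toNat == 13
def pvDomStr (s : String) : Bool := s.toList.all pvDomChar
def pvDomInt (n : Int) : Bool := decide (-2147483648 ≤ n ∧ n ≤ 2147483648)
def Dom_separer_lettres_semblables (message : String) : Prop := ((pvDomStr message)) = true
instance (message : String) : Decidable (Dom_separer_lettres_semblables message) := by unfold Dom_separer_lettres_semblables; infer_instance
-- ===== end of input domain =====

-- B replaces A's step-by-2 lookahead scan that repeatedly re-slices and mutates the string with a single streaming pass keeping a pending character (objective: simpler; return value only).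


-- ===== PORT A =====
-- A's while loop over the mutated string; message[index] and message[index+1] are always
-- read with the index in range, so `getD` is exact; message[:index+1] + 'X' + message[index+1:]
-- is take/append/drop.
def pvLoopA (msg : List Char) (index : Nat) : List Char :=
  if _h : index < msg.length then
    let m1 := msg.getD index ' '
    if index = msg.length - 1 then
      pvLoopA (msg ++ ['X']) (index + 2)
    else
      let m2 := msg.getD (index + 1) ' '
      if m1 = m2 then
        pvLoopA (msg.take (index + 1) ++ ['X'] ++ msg.drop (index + 1)) (index + 2)
      else
        pvLoopA msg (index + 2)
  else msg
termination_by msg.length + 1 - index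
decreasing_by all_goals (simp_all [List.length_append]; omega)

def separer_lettres_semblables (message : String) : String :=
  String.mk (pvLoopA message.toList 0)

-- ===== PORT B =====
-- one step of B's for-loop: state = (out, pending)
def pvStepB (st : List Char × Option Char) (c : Char) : List Char × Option Char :=
  match st.2 with
  | none => (st.1, some c)
  | some p => if p = c then (st.1 ++ [p, 'X'], some c) else (st.1 ++ [p, c], none)

def separer_lettres_semblables_alt (message : String) : String :=
  let st := message.toList.foldl pvStepB ([], none)
  String.mk (match st.2 with
    | none => st.1
    | some p => st.1 ++ [p, 'X'])

-- ===== PRECONDITION & SPEC =====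
def Spec_separer_lettres_semblables (message : String) (out : String) : Prop := out = separer_lettres_semblables_alt message
instance (message : String) (out : String) : Decidable (Spec_separer_lettres_semblables message out) := by unfold Spec_separer_lettres_semblables; infer_instance

-- ===== CLAIM (what is proved, stated in full; the proofs are below) =====
def Claim_equal_separer_lettres_semblables : Prop := ∀ (message : String), Dom_separer_lettres_semblables message → Spec_separer_lettres_semblables message (separer_lettres_semblables message)

-- ===== LEMMAS AND PROOFS =====

-- the common description of both loops: pair off the list, inserting 'X' after the first
-- of an equal pair and after a dangling final character
def pvF : List Char → List Char
  | [] => []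
  | [a] => [a, 'X']
  | a :: b :: rest => if a = b then a :: 'X' :: pvF (b :: rest) else a :: b :: pvF rest


theorem pvLoopA_eq (msg : List Char) (index : Nat) (h : index ≤ msg.length) :
    pvLoopA msg index = msg.take index ++ pvF (msg.drop index) := by
  fun_induction pvLoopA msg index
  case case1 msg hlt ih =>
    have hlen : 1 ≤ msg.length := by omega
    rw [ih (by simp; omega)]
    rw [List.take_of_length_le (by simp; omega), List.drop_eq_nil_of_le (by simp; omega)]
    have hd : msg.drop (msg.length - 1) = [msg[msg.length - 1]] := by
      rw [List.drop_eq_getElem_cons hlt]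
      simp [List.drop_eq_nil_of_le, hlen]
    have ht : msg.take (msg.length - 1) ++ [msg[msg.length - 1]] = msg := by
      have h2 : msg.take (msg.length - 1 + 1) = msg.take (msg.length - 1) ++ [msg[msg.length - 1]] := by
        rw [List.take_add_one, List.getElem?_eq_getElem hlt]
        rfl
      rw [← h2, Nat.sub_add_cancel hlen, List.take_length]
    rw [hd]
    simp only [pvF, List.append_nil]
    conv_rhs => rw [show ([msg[msg.length - 1], 'X'] : List Char) = [msg[msg.length - 1]] ++ ['X'] from rfl, ← List.append_assoc, ht]
  case case2 msg index hlt m1 hne m2 heq ih =>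
    have hi1 : index + 1 < msg.length := by omega
    rw [ih (by simp; omega)]
    have hu : (msg.take (index + 1) ++ ['X']).length = index + 2 := by simp; omega
    rw [List.take_left' hu, List.drop_left' hu]
    have hab : msg[index] = msg[index + 1] := by
      have h' : msg.getD index ' ' = msg.getD (index + 1) ' ' := heq
      rwa [List.getD_eq_getElem _ _ hlt, List.getD_eq_getElem _ _ hi1] at h'
    have hda : msg.drop index = msg[index] :: msg.drop (index + 1) :=
      List.drop_eq_getElem_cons hlt
    have hdb : msg.drop (index + 1) = msg[index + 1] :: msg.drop (index + 2) :=
      List.drop_eq_getElem_cons hi1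
    have hta : msg.take (index + 1) = msg.take index ++ [msg[index]] := by
      rw [List.take_add_one, List.getElem?_eq_getElem hlt]; rfl
    have hp : pvF (msg[index] :: msg[index + 1] :: msg.drop (index + 2)) =
        msg[index] :: 'X' :: pvF (msg[index + 1] :: msg.drop (index + 2)) := by
      simp [pvF, hab]
    rw [hda, hdb, hp, ← hdb, hta]
    simp only [List.append_assoc, List.cons_append, List.singleton_append, List.nil_append]
  case case3 msg index hlt m1 hne m2 hneq ih =>
    have hi1 : index + 1 < msg.length := by omega
    rw [ih (by omega)]
    have hab : msg[index] ≠ msg[index + 1] := by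
      have h' : ¬ msg.getD index ' ' = msg.getD (index + 1) ' ' := hneq
      rwa [List.getD_eq_getElem _ _ hlt, List.getD_eq_getElem _ _ hi1] at h'
    have hda : msg.drop index = msg[index] :: msg.drop (index + 1) :=
      List.drop_eq_getElem_cons hlt
    have hdb : msg.drop (index + 1) = msg[index + 1] :: msg.drop (index + 2) :=
      List.drop_eq_getElem_cons hi1
    have hta : msg.take (index + 1) = msg.take index ++ [msg[index]] := by
      rw [List.take_add_one, List.getElem?_eq_getElem hlt]; rfl
    have htb : msg.take (index + 2) = msg.take (index + 1) ++ [msg[index + 1]] := by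
      rw [List.take_add_one, List.getElem?_eq_getElem hi1]; rfl
    have hp : pvF (msg[index] :: msg[index + 1] :: msg.drop (index + 2)) =
        msg[index] :: msg[index + 1] :: pvF (msg.drop (index + 2)) := by
      simp [pvF, hab]
    rw [hda, hdb, hp, htb, hta]
    simp only [List.append_assoc, List.cons_append, List.singleton_append, List.nil_append]
  case case4 msg index hge =>
    have : index = msg.length := by omega
    subst this
    simp [pvF]

theorem pvFoldB_eq (l : List Char) (acc : List Char) (p : Option Char) :
    (match (l.foldl pvStepB (acc, p)).2 with
      | none => (l.foldl pvStepB (acc, p)).1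
      | some q => (l.foldl pvStepB (acc, p)).1 ++ [q, 'X'])
    = acc ++ (match p with
      | none => pvF l
      | some a => pvF (a :: l)) := by
  induction l generalizing acc p with
  | nil => cases p <;> simp [pvF]
  | cons c l ih =>
    cases p with
    | none => simpa [pvStepB] using ih acc (some c)
    | some a =>
      by_cases hac : a = c
      · subst hac
        have hs : pvStepB (acc, some a) a = (acc ++ [a, 'X'], some a) := by simp [pvStepB]
        rw [List.foldl_cons, hs, ih (acc ++ [a, 'X']) (some a)]
        simp [pvF]
      · have hs : pvStepB (acc, some a) c = (acc ++ [a, c], none) := by simp [pvStepB, hac]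
        rw [List.foldl_cons, hs, ih (acc ++ [a, c]) none]
        simp [pvF, hac]

-- ===== VERDICT (by name: the statement is the Claim_ definition above) =====
theorem separer_lettres_semblables_spec : Claim_equal_separer_lettres_semblables := by
  intro message _
  unfold Spec_separer_lettres_semblables separer_lettres_semblables separer_lettres_semblables_alt
  have hA := pvLoopA_eq message.toList 0 (Nat.zero_le _)
  simp only [List.take_zero, List.drop_zero, List.nil_append] at hA
  have hB := pvFoldB_eq message.toList [] none
  simp only [List.nil_append] at hB
  rw [hA]
  exact congrArg String.mk hB.symm
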